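-- pv_equiv track=rewrite | github.com/Sensucare/sensu-api | eview/alarm_parser.py | get_alarm_priority
-- ===== SOURCE A (Python) =====
-- from typing import Dict, List, Optional, Tuple
--
-- ALARM_TYPES: Dict[int, Dict[str, str]] = {
--     0:  {"type": "battery_low", "priority": "high", "label": "Battery Low"},
--     1:  {"type": "over_speed", "priority": "medium", "label": "Over Speed"},
--     2:  {"type": "fall_detection", "priority": "critical", "label": "Fall Detection"},
--     3:  {"type": "tilt", "priority": "medium", "label": "Tilt Alert"},
--     4:  {"type": "geofence_1", "priority": "high", "label": "Geofence Zone 1"},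
--     5:  {"type": "geofence_2", "priority": "high", "label": "Geofence Zone 2"},
--     6:  {"type": "geofence_3", "priority": "high", "label": "Geofence Zone 3"},
--     7:  {"type": "geofence_4", "priority": "high", "label": "Geofence Zone 4"},
--     8:  {"type": "power_off", "priority": "medium", "label": "Power Off"},
--     9:  {"type": "power_on", "priority": "low", "label": "Power On"},
--     10: {"type": "motion", "priority": "low", "label": "Motion Alert"},
--     11: {"type": "no_motion", "priority": "medium", "label": "No Motion"},
--     12: {"type": "sos", "priority": "critical", "label": "SOS"},
--     13: {"type": "side_button_1", "priority": "critical", "label": "Side Button 1"},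
--     14: {"type": "side_button_2", "priority": "high", "label": "Side Button 2"},
--     15: {"type": "charging_start", "priority": "low", "label": "Charging Started"},
--     16: {"type": "charging_stop", "priority": "low", "label": "Charging Stopped"},
--     17: {"type": "sos_ending", "priority": "medium", "label": "SOS Ending"},
--     19: {"type": "welfare_check", "priority": "medium", "label": "Welfare Check"},
--     21: {"type": "fall_ending", "priority": "low", "label": "Fall Alert Ending"},
--     24: {"type": "leave_home", "priority": "high", "label": "Left Home"},
--     25: {"type": "at_home", "priority": "low", "label": "At Home"},
-- }
--
-- GEO_DIRECTION_BITS: Dict[int, int] = {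
--     4: 26,  # Geofence 1 direction at bit 26
--     5: 27,  # Geofence 2 direction at bit 27
--     6: 28,  # Geofence 3 direction at bit 28
--     7: 29,  # Geofence 4 direction at bit 29
-- }
--
-- def parse_alarm_code(alarm_code: int, alarm_code_extend: int = 0) -> List[Dict]:
--     """
--     Parse a 32-bit alarm code into a list of active alarm events.
--
--     Args:
--         alarm_code: 32-bit integer alarm code from MQTT trackerAlarm
--         alarm_code_extend: Extended alarm code (reserved for future use)
--
--     Returns:
--         List of alarm dicts with keys: type, priority, label, bit, direction (for geofences)
--     """
--     if alarm_code is None or alarm_code == 0: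
--         return []
--
--     active_alarms = []
--
--     for bit, alarm_info in ALARM_TYPES.items():
--         if alarm_code & (1 << bit):
--             alarm = {
--                 "type": alarm_info["type"],
--                 "priority": alarm_info["priority"],
--                 "label": alarm_info["label"],
--                 "bit": bit,
--             }
--
--             # For geofence alarms, determine direction (in/out)
--             if bit in GEO_DIRECTION_BITS:
--                 direction_bit = GEO_DIRECTION_BITS[bit]
--                 is_entering = bool(alarm_code & (1 << direction_bit))
--                 alarm["direction"] = "enter" if is_entering else "exit"
--                 alarm["zone_number"] = bit - 3  # bits 4-7 map to zones 1-4
--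
--             active_alarms.append(alarm)
--
--     return active_alarms
--
-- def get_alarm_priority(alarm_code: int) -> str:
--     """
--     Get the highest priority level from all active alarms.
--
--     Returns: 'critical', 'high', 'medium', or 'low'
--     """
--     priority_order = ["critical", "high", "medium", "low"]
--     alarms = parse_alarm_code(alarm_code)
--
--     if not alarms:
--         return "low"
--
--     for priority in priority_order:
--         if any(a["priority"] == priority for a in alarms):
--             return priority
--
--     return "low"
-- ===== SOURCE B (Python) =====
-- from typing import Dict
--
-- ALARM_TYPES: Dict[int, Dict[str, str]] = {
--     0:  {"type": "battery_low", "priority": "high", "label": "Battery Low"},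
--     1:  {"type": "over_speed", "priority": "medium", "label": "Over Speed"},
--     2:  {"type": "fall_detection", "priority": "critical", "label": "Fall Detection"},
--     3:  {"type": "tilt", "priority": "medium", "label": "Tilt Alert"},
--     4:  {"type": "geofence_1", "priority": "high", "label": "Geofence Zone 1"},
--     5:  {"type": "geofence_2", "priority": "high", "label": "Geofence Zone 2"},
--     6:  {"type": "geofence_3", "priority": "high", "label": "Geofence Zone 3"},
--     7:  {"type": "geofence_4", "priority": "high", "label": "Geofence Zone 4"},
--     8:  {"type": "power_off", "priority": "medium", "label": "Power Off"},
--     9:  {"type": "power_on", "priority": "low", "label": "Power On"},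
--     10: {"type": "motion", "priority": "low", "label": "Motion Alert"},
--     11: {"type": "no_motion", "priority": "medium", "label": "No Motion"},
--     12: {"type": "sos", "priority": "critical", "label": "SOS"},
--     13: {"type": "side_button_1", "priority": "critical", "label": "Side Button 1"},
--     14: {"type": "side_button_2", "priority": "high", "label": "Side Button 2"},
--     15: {"type": "charging_start", "priority": "low", "label": "Charging Started"},
--     16: {"type": "charging_stop", "priority": "low", "label": "Charging Stopped"},
--     17: {"type": "sos_ending", "priority": "medium", "label": "SOS Ending"},
--     19: {"type": "welfare_check", "priority": "medium", "label": "Welfare Check"},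
--     21: {"type": "fall_ending", "priority": "low", "label": "Fall Alert Ending"},
--     24: {"type": "leave_home", "priority": "high", "label": "Left Home"},
--     25: {"type": "at_home", "priority": "low", "label": "At Home"},
-- }
--
-- _RANK = {"critical": 0, "high": 1, "medium": 2, "low": 3}
-- _ORDER = ["critical", "high", "medium", "low"]
--
-- def get_alarm_priority(alarm_code: int) -> str:
--     """Highest priority among active alarm bits, in one pass with a min-rank accumulator."""
--     if alarm_code is None or alarm_code == 0:
--         return "low"
--     best = 4
--     for bit, info in ALARM_TYPES.items():
--         if alarm_code & (1 << bit):
--             best = min(best, _RANK.get(info["priority"], 4))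
--     return _ORDER[best] if best < 4 else "low"
-- ===== Notes on version B (the rewrite author's own statement) =====
-- stated objective: simpler
-- what changed: A builds the full list of active alarm dicts (with direction/zone fields) and then scans it once per priority level; B makes a single pass over ALARM_TYPES keeping the minimum priority rank seen, with no intermediate list.
import Mathlib
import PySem

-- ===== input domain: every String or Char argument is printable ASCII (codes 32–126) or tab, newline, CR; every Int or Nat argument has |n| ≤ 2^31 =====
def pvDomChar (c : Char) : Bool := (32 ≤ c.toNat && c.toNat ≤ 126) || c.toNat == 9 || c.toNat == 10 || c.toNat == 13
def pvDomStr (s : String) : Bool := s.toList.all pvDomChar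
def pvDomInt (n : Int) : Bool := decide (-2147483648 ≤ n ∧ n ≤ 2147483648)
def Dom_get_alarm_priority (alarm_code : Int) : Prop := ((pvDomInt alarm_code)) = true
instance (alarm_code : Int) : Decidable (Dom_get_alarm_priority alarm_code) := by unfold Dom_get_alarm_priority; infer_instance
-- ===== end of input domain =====

-- B replaces A's build-list-of-alarm-dicts-then-scan-per-priority with a single pass keeping the minimum priority rank (objective: simpler).


-- ===== PORT A =====
structure AlarmInfo where
  ty : String
  priority : String
  label : String
deriving DecidableEq, Repr

-- ALARM_TYPES, insertion order; bit keys as Nat (all are small nonnegative literals in the Python source)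
def alarmTypes : List (Nat × AlarmInfo) :=
  [ (0,  ⟨"battery_low", "high", "Battery Low"⟩),
    (1,  ⟨"over_speed", "medium", "Over Speed"⟩),
    (2,  ⟨"fall_detection", "critical", "Fall Detection"⟩),
    (3,  ⟨"tilt", "medium", "Tilt Alert"⟩),
    (4,  ⟨"geofence_1", "high", "Geofence Zone 1"⟩),
    (5,  ⟨"geofence_2", "high", "Geofence Zone 2"⟩),
    (6,  ⟨"geofence_3", "high", "Geofence Zone 3"⟩),
    (7,  ⟨"geofence_4", "high", "Geofence Zone 4"⟩),
    (8,  ⟨"power_off", "medium", "Power Off"⟩),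
    (9,  ⟨"power_on", "low", "Power On"⟩),
    (10, ⟨"motion", "low", "Motion Alert"⟩),
    (11, ⟨"no_motion", "medium", "No Motion"⟩),
    (12, ⟨"sos", "critical", "SOS"⟩),
    (13, ⟨"side_button_1", "critical", "Side Button 1"⟩),
    (14, ⟨"side_button_2", "high", "Side Button 2"⟩),
    (15, ⟨"charging_start", "low", "Charging Started"⟩),
    (16, ⟨"charging_stop", "low", "Charging Stopped"⟩),
    (17, ⟨"sos_ending", "medium", "SOS Ending"⟩),
    (19, ⟨"welfare_check", "medium", "Welfare Check"⟩),
    (21, ⟨"fall_ending", "low", "Fall Alert Ending"⟩),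
    (24, ⟨"leave_home", "high", "Left Home"⟩),
    (25, ⟨"at_home", "low", "At Home"⟩) ]

def geoDirectionBits : PySem.Dict Nat Nat :=
  PySem.Dict.ofList [(4, 26), (5, 27), (6, 28), (7, 29)]

-- one active alarm record (direction/zone present only for geofence bits)
structure Alarm where
  ty : String
  priority : String
  label : String
  bit : Nat
  direction : Option String
  zone : Option Int
deriving DecidableEq, Repr

def mkAlarmA (alarm_code : Int) (bit : Nat) (info : AlarmInfo) : Alarm :=
  if geoDirectionBits.contains bit then
    -- GEO_DIRECTION_BITS[bit]: the contains-guard makes the lookup total (getD default never read)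
    let direction_bit := geoDirectionBits.getD bit 0
    let is_entering := PySem.Int.band alarm_code (1 <<< direction_bit) ≠ 0
    { ty := info.ty, priority := info.priority, label := info.label, bit := bit,
      direction := some (if is_entering then "enter" else "exit"),
      zone := some ((bit : Int) - 3) }
  else
    { ty := info.ty, priority := info.priority, label := info.label, bit := bit,
      direction := none, zone := none }

-- the for-loop of parse_alarm_code, appending active alarms in order
def parseLoopA (alarm_code : Int) : List (Nat × AlarmInfo) → List Alarm
  | [] => []
  | (bit, info) :: rest =>
    if PySem.Int.band alarm_code (1 <<< bit) ≠ 0 then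
      mkAlarmA alarm_code bit info :: parseLoopA alarm_code rest
    else
      parseLoopA alarm_code rest

def parse_alarm_code (alarm_code : Int) (_alarm_code_extend : Int) : List Alarm :=
  if alarm_code = 0 then [] else parseLoopA alarm_code alarmTypes

-- the 'for priority in priority_order: if any(...)' loop
def prioLoopA (alarms : List Alarm) : List String → String
  | [] => "low"
  | p :: rest => if alarms.any (fun a => a.priority == p) then p else prioLoopA alarms rest

def get_alarm_priority (alarm_code : Int) : String :=
  let priority_order := ["critical", "high", "medium", "low"]
  let alarms := parse_alarm_code alarm_code 0
  if alarms = [] then "low" else prioLoopA alarms priority_order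

-- ===== PORT B =====
def rankDictB : PySem.Dict String Int :=
  PySem.Dict.ofList [("critical", 0), ("high", 1), ("medium", 2), ("low", 3)]

def orderB : List String := ["critical", "high", "medium", "low"]

-- B's single pass: minimum rank among active bits, starting from 4
def bestLoopB (alarm_code : Int) : List (Nat × AlarmInfo) → Int → Int
  | [], best => best
  | (bit, info) :: rest, best =>
    bestLoopB alarm_code rest
      (if PySem.Int.band alarm_code (1 <<< bit) ≠ 0 then
        min best (rankDictB.getD info.priority 4)
      else best)

def get_alarm_priority_alt (alarm_code : Int) : String :=
  if alarm_code = 0 then "low"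
  else
    let best := bestLoopB alarm_code alarmTypes 4
    if best < 4 then (PySem.List.pyGet? orderB best).getD "low" else "low"

-- ===== PRECONDITION & SPEC =====
def Spec_get_alarm_priority (alarm_code : Int) (out : String) : Prop := out = get_alarm_priority_alt alarm_code
instance (alarm_code : Int) (out : String) : Decidable (Spec_get_alarm_priority alarm_code out) := by unfold Spec_get_alarm_priority; infer_instance

-- ===== CLAIM (what is proved, stated in full; the proofs are below) =====
def Claim_equal_get_alarm_priority : Prop := ∀ (alarm_code : Int), Dom_get_alarm_priority alarm_code → Spec_get_alarm_priority alarm_code (get_alarm_priority alarm_code)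

-- ===== LEMMAS AND PROOFS =====

-- the list of priorities of the active entries of l
def activePrios (alarm_code : Int) (l : List (Nat × AlarmInfo)) : List String :=
  (l.filter (fun bi => PySem.Int.band alarm_code (1 <<< bi.1) != 0)).map (fun bi => bi.2.priority)

def rankB (p : String) : Int := rankDictB.getD p 4

-- B's fold expressed on the priority list
def foldMinB : List String → Int → Int
  | [], b => b
  | p :: ps, b => foldMinB ps (min b (rankB p))

lemma parseLoopA_map_priority (code : Int) (l : List (Nat × AlarmInfo)) :
    (parseLoopA code l).map (fun a => a.priority) = activePrios code l := by
  induction l with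
  | nil => rfl
  | cons bi rest ih =>
    obtain ⟨bit, info⟩ := bi
    simp only [activePrios, parseLoopA, List.filter_cons, bne_iff_ne, ne_eq] at ih ⊢
    split_ifs with h0
    · exact ih
    · simp [mkAlarmA, apply_ite (fun a => Alarm.priority a), ih]

lemma bestLoopB_eq_foldMinB (code : Int) (l : List (Nat × AlarmInfo)) (b : Int) :
    bestLoopB code l b = foldMinB (activePrios code l) b := by
  induction l generalizing b with
  | nil => rfl
  | cons bi rest ih =>
    obtain ⟨bit, info⟩ := bi
    simp only [activePrios, bestLoopB, List.filter_cons, bne_iff_ne, ne_eq] at ih ⊢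
    split_ifs with h0
    · exact ih b
    · simp only [List.map_cons, foldMinB, ih, rankB]

lemma rankB_cases (p : String) :
    rankB p = 0 ∨ rankB p = 1 ∨ rankB p = 2 ∨ rankB p = 3 ∨ rankB p = 4 := by
  have hmk : rankDictB = PySem.Dict.mk [("critical", 0), ("high", 1), ("medium", 2), ("low", 3)] := by decide
  simp only [rankB, hmk, PySem.Dict.getD_eq_get?_getD, PySem.Dict.get?_mk_cons]
  split_ifs <;> simp [PySem.Dict.get?]

lemma rankB_le (p : String) : rankB p ≤ 4 := by rcases rankB_cases p with h|h|h|h|h <;> omega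

lemma foldMinB_acc (ps : List String) : ∀ b, b ≤ 4 → foldMinB ps b = min b (foldMinB ps 4) := by
  induction ps with
  | nil => intro b hb; simp [foldMinB]; omega
  | cons p ps ih =>
    intro b hb
    have h1 : min b (rankB p) ≤ 4 := le_trans (min_le_left _ _) hb
    have h2 : min 4 (rankB p) ≤ 4 := min_le_left _ _
    have hr := rankB_le p
    simp only [foldMinB]
    rw [ih _ h1, ih _ h2]
    omega

lemma foldMinB_char (ps : List String)
    (h : ∀ p ∈ ps, p = "critical" ∨ p = "high" ∨ p = "medium" ∨ p = "low") :
    foldMinB ps 4 =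
      if ps.any (· == "critical") then 0
      else if ps.any (· == "high") then 1
      else if ps.any (· == "medium") then 2
      else if ps.isEmpty then 4 else 3 := by
  induction ps with
  | nil => rfl
  | cons p ps ih =>
    have hp := h p (List.mem_cons_self ..)
    have hps : ∀ q ∈ ps, q = "critical" ∨ q = "high" ∨ q = "medium" ∨ q = "low" :=
      fun q hq => h q (List.mem_cons_of_mem _ hq)
    have hih := ih hps
    have hstep : foldMinB (p :: ps) 4 = min (rankB p) (foldMinB ps 4) := by
      simp only [foldMinB]
      rw [foldMinB_acc ps _ (min_le_left _ _)]
      have := rankB_le p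
      omega
    have r0 : rankB "critical" = 0 := by decide
    have r1 : rankB "high" = 1 := by decide
    have r2 : rankB "medium" = 2 := by decide
    have r3 : rankB "low" = 3 := by decide
    rw [hstep, hih]
    rcases hp with rfl | rfl | rfl | rfl <;>
      simp only [r0, r1, r2, r3, List.any_cons, List.isEmpty_cons] <;>
      simp <;>
      split_ifs <;>
      omega


lemma activePrios_mem (code : Int) :
    ∀ p ∈ activePrios code alarmTypes,
      p = "critical" ∨ p = "high" ∨ p = "medium" ∨ p = "low" := by
  intro p hp
  simp only [activePrios, List.mem_map, List.mem_filter] at hp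
  obtain ⟨bi, ⟨hbi, hb⟩, rfl⟩ := hp
  clear hb
  revert bi
  decide

lemma chain_correct (ps : List String)
    (h : ∀ p ∈ ps, p = "critical" ∨ p = "high" ∨ p = "medium" ∨ p = "low") :
    (if ps = [] then "low"
     else if ps.any (· == "critical") then "critical"
     else if ps.any (· == "high") then "high"
     else if ps.any (· == "medium") then "medium"
     else if ps.any (· == "low") then "low"
     else "low") =
    (if foldMinB ps 4 < 4 then (PySem.List.pyGet? orderB (foldMinB ps 4)).getD "low" else "low") := by
  rw [foldMinB_char ps h]
  by_cases hps : ps = []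
  · subst hps; decide
  · have hne : ps.isEmpty = false := by simpa using hps
    simp only [if_neg hps, hne]
    split_ifs <;> first | rfl | decide | (exfalso; omega)

-- ===== VERDICT (by name: the statement is the Claim_ definition above) =====
theorem get_alarm_priority_spec : Claim_equal_get_alarm_priority := by
  intro code _
  unfold Spec_get_alarm_priority get_alarm_priority get_alarm_priority_alt parse_alarm_code
  by_cases h0 : code = 0
  · simp [h0]
  · simp only [if_neg h0]
    have hmem := activePrios_mem code
    have hmap := parseLoopA_map_priority code alarmTypes
    have hbest := bestLoopB_eq_foldMinB code alarmTypes 4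
    have hchain := chain_correct (activePrios code alarmTypes) hmem
    rw [hbest]
    by_cases hnil : parseLoopA code alarmTypes = []
    · have hps : activePrios code alarmTypes = [] := by rw [← hmap, hnil]; rfl
      rw [if_pos hnil, if_pos hps] at *
      simpa [hps] using hchain
    · have hps : activePrios code alarmTypes ≠ [] := by
        rw [← hmap]
        simpa using hnil
      rw [if_neg hps] at hchain
      rw [if_neg hnil, ← hchain]
      simp only [prioLoopA, ← hmap, List.any_map, Function.comp_def]
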